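-- pv_equiv track=rewrite | github.com/peterwaksman/Narwhal | narwhal/nwutils.py | separateMM
-- ===== SOURCE A (Python) =====
-- def separateMM(text):
--     h = len(text)
--     if h < 3:
--         return text
--
--     newtext = ""
--     c = text[0]
--     newtext += c
--     for i in range(1, len(text)-1):
--         if ((text[i]=='m' and text[i+1]=='m') or (text[i]=='M' and text[i+1]=='M')) and c.isdigit():
--             newtext += " "
--         c = text[i]
--         newtext += c
--     newtext += text[len(text)-1]
--
--     # TODO: check for decimal point preceeding an "mm", and insert one if needed
--     # helps disambiguate ints that are intended as floats
--
--     return newtext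
-- ===== SOURCE B (Python) =====
-- def separateMM(text):
--     # consuming 3-char-window scanner: emit digit+' '+mm and skip past the match,
--     # instead of A's per-index loop with a trailing previous-char variable
--     out = []
--     i = 0
--     n = len(text)
--     while i < n:
--         if i + 2 < n and text[i + 1:i + 3] in ('mm', 'MM'):
--             if text[i].isdigit():
--                 out.append(text[i] + ' ' + text[i + 1:i + 3])
--             else:
--                 out.append(text[i:i + 3])
--             i += 3
--         else:
--             out.append(text[i])
--             i += 1
--     return ''.join(out)
-- ===== Notes on version B (the rewrite author's own statement) =====
-- stated objective: alternative
-- what changed: Replaced A's index loop that drags a previous-character variable and decides per position whether to prepend a space with a consuming three-character-window scanner that, on seeing digit+mm/MM, emits the separated chunk and jumps past the whole match.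
import Mathlib
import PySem

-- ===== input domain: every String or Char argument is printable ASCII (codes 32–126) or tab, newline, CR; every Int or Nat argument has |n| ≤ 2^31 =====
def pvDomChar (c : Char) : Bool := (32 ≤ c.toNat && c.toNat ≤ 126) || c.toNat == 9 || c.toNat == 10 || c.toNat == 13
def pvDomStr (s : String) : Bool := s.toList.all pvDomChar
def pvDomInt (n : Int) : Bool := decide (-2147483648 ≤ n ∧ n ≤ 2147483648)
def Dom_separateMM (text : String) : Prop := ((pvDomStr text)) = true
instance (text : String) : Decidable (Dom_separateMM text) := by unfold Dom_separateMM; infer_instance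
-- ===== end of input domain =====

-- B replaces A's per-index loop (previous-char state) by a consuming 3-char-window scanner; same values, alternative structure.

-- ===== PORT A =====
-- the 'mm'/'MM' pair test both Pythons perform on two characters
def pairMM (b c : Char) : Bool := (b == 'm' && c == 'm') || (b == 'M' && c == 'M')

-- A's for-loop over i ∈ [1, n-2]: state = (newtext accumulator, previous char c); the
-- remaining suffix text[i:] stands for the index; the post-loop 'newtext += text[n-1]'
-- is the one-element base case.
def sepLoop (acc : List Char) (c : Char) : List Char → List Char
  | cur :: next :: rest =>
      sepLoop ((if pairMM cur next && PySem.Chars.isdigit c then acc ++ [' '] else acc) ++ [cur]) cur (next :: rest)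
  | [last] => acc ++ [last]
  | [] => acc

def separateMM (text : String) : String :=
  let h : Int := PySem.Str.len text
  if h < 3 then text
  else
    match text.toList with
    | [] => text
    | c0 :: rest => String.ofList (sepLoop [c0] c0 rest)

-- ===== PORT B =====
-- B's while-loop: consume 3 chars on a match (with or without the extra space), else 1
def bScan : List Char → List Char
  | a :: b :: c :: rest =>
      if pairMM b c then
        if PySem.Chars.isdigit a then a :: ' ' :: b :: c :: bScan rest
        else a :: b :: c :: bScan rest
      else a :: bScan (b :: c :: rest)
  | l => l
  termination_by l => l.length

def separateMM_alt (text : String) : String := String.ofList (bScan text.toList)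

-- ===== PRECONDITION & SPEC =====
def Spec_separateMM (text : String) (out : String) : Prop := out = separateMM_alt text
instance (text : String) (out : String) : Decidable (Spec_separateMM text out) := by unfold Spec_separateMM; infer_instance

-- ===== CLAIM (what is proved, stated in full; the proofs are below) =====
def Claim_equal_separateMM : Prop := ∀ (text : String), Dom_separateMM text → Spec_separateMM text (separateMM text)

-- ===== LEMMAS AND PROOFS =====

lemma bScan_short (l : List Char) (h : l.length < 3) : bScan l = l := by
  match l with
  | [] => simp [bScan]
  | [_] => simp [bScan]
  | [_, _] => simp [bScan]
  | _ :: _ :: _ :: _ => simp at h; omega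

lemma sepLoop_acc (l : List Char) : ∀ (acc : List Char) (c : Char),
    sepLoop acc c l = acc ++ sepLoop [] c l := by
  induction l with
  | nil => intro acc c; simp [sepLoop]
  | cons cur tl ih =>
      intro acc c
      cases tl with
      | nil => simp [sepLoop]
      | cons next rest =>
          rw [sepLoop, sepLoop, ih, ih (_ ++ [cur])]
          split_ifs <;> simp

lemma pairMM_not_digit {b c : Char} (h : pairMM b c = true) :
    PySem.Chars.isdigit b = false ∧ PySem.Chars.isdigit c = false := by
  simp only [pairMM, Bool.or_eq_true, Bool.and_eq_true, beq_iff_eq] at h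
  rcases h with ⟨hb, hc⟩ | ⟨hb, hc⟩ <;> subst hb <;> subst hc <;> exact ⟨by decide, by decide⟩

lemma main_lemma : ∀ (n : Nat) (l : List Char) (prev : Char), l.length ≤ n →
    (prev :: sepLoop [] prev l = bScan (prev :: l)) ∧
    (PySem.Chars.isdigit prev = false → sepLoop [] prev l = bScan l) := by
  intro n
  induction n with
  | zero =>
      intro l prev h
      have : l = [] := by cases l <;> simp_all
      subst this
      exact ⟨by simp [sepLoop, bScan], fun _ => by simp [sepLoop, bScan]⟩
  | succ n ih =>
      intro l prev h
      match l with
      | [] => exact ⟨by simp [sepLoop, bScan], fun _ => by simp [sepLoop, bScan]⟩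
      | [x] => exact ⟨by simp [sepLoop, bScan], fun _ => by simp [sepLoop, bScan]⟩
      | cur :: next :: rest =>
        simp only [List.length_cons] at h
        have hrest : rest.length ≤ n := by omega
        have hnr : (next :: rest).length ≤ n := by simp; omega
        -- key step: after a pair match, A's scan over the consumed region adds nothing
        have hstep : pairMM cur next = true →
            sepLoop [] cur (next :: rest) = next :: bScan rest := by
          intro hp
          obtain ⟨hcur, hnext⟩ := pairMM_not_digit hp
          match rest with
          | [] => simp [sepLoop, bScan]
          | r :: rs =>
              have h2 := (ih (r :: rs) next (by simp at hrest ⊢; omega)).2 hnext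
              rw [sepLoop]
              rw [show (if pairMM next r && PySem.Chars.isdigit cur then ([] : List Char) ++ [' '] else []) ++ [next] = [next] from by simp [hcur]]
              rw [sepLoop_acc, h2]
              simp
        constructor
        · -- M part
          rw [sepLoop, sepLoop_acc]
          by_cases hp : pairMM cur next = true
          · rw [hstep hp]
            by_cases hd : PySem.Chars.isdigit prev = true
            · simp [bScan, hp, hd]
            · simp only [Bool.not_eq_true] at hd
              simp [bScan, hp, hd]
          · have hM := (ih (next :: rest) cur hnr).1
            simp only [Bool.not_eq_true] at hp
            simp [bScan, hp, ← hM]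
        · -- L2 part
          intro hd
          rw [sepLoop, hd, sepLoop_acc]
          have hM := (ih (next :: rest) cur hnr).1
          simp [← hM]

-- ===== VERDICT (by name: the statement is the Claim_ definition above) =====
theorem separateMM_spec : Claim_equal_separateMM := by
  unfold Claim_equal_separateMM
  intro text _
  unfold Spec_separateMM separateMM separateMM_alt
  simp only [PySem.Str.len]
  by_cases h3 : (text.toList.length : Int) < 3
  · rw [if_pos h3, bScan_short _ (by exact_mod_cast h3)]; simp
  · rw [if_neg h3]
    have hlen : 3 ≤ text.toList.length := by omega
    match hm : text.toList with
    | [] => simp [hm] at hlen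
    | c0 :: rest =>
        have hM := (main_lemma rest.length rest c0 le_rfl).1
        show String.ofList (sepLoop [c0] c0 rest) = _
        rw [sepLoop_acc]
        simp [← hM]
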